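-- pv_equiv track=rewrite | github.com/matlabpackages/elm-package-benchmark | graph.py | get_all_deps
-- ===== SOURCE A (Python) =====
-- def get_all_deps(graph):
--     all_deps = []
--     for package, versions in graph.items():
--         for version, deps in versions.items():
--             for dep, vers in deps.items():
--                 if dep not in graph:
--                     raise ValueError(f'missing: {dep}')
--                 all_deps.append(vers)
--     return all_deps
-- ===== SOURCE B (Python) =====
-- def get_all_deps(graph):
--     # pass 1: validation only, same iteration order as the collector
--     for versions in graph.values():
--         for deps in versions.values():
--             for dep in deps:
--                 if dep not in graph:
--                     raise ValueError(f'missing: {dep}')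
--     # pass 2: flat collection
--     return [vers for versions in graph.values()
--                  for deps in versions.values()
--                  for vers in deps.values()]
-- ===== Notes on version B (the rewrite author's own statement) =====
-- stated objective: simpler
-- what changed: Split A's single interleaved loop into a validation-only pass (same iteration order, same first-missing-dep ValueError) followed by a flat nested comprehension that collects all version specs.
import Mathlib
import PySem

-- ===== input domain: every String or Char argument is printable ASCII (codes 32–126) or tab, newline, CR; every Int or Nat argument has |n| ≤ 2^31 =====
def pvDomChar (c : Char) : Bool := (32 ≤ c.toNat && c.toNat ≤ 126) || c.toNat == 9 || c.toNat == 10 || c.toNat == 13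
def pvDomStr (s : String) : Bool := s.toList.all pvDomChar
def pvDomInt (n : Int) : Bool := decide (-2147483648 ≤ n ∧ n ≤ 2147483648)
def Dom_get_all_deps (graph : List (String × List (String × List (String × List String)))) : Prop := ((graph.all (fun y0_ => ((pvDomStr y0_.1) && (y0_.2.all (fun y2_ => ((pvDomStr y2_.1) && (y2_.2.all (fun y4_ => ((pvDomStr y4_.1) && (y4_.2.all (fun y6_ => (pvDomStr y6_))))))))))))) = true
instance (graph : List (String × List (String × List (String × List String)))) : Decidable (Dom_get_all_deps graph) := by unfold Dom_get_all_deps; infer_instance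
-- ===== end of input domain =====

-- B splits A's single interleaved loop into a validation-only pass plus a flat
-- comprehension that collects the version specs (objective: simpler).
-- Python's 'raise ValueError' is modelled as Option.none in both ports; Pre_ excludes it.

-- ===== PORT A =====
-- innermost loop: for dep, vers in deps.items(): check membership, append vers
def pvLoopDepsA (keys : List String) (acc : List (List String)) :
    List (String × List String) → Option (List (List String))
  | [] => some acc
  | (dep, vers) :: rest =>
    if keys.contains dep then pvLoopDepsA keys (acc ++ [vers]) rest
    else none  -- raise ValueError(f'missing: {dep}')

def pvLoopVersA (keys : List String) (acc : List (List String)) :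
    List (String × List (String × List String)) → Option (List (List String))
  | [] => some acc
  | (_, deps) :: rest =>
    match pvLoopDepsA keys acc deps with
    | none => none
    | some acc' => pvLoopVersA keys acc' rest

def pvLoopPkgsA (keys : List String) (acc : List (List String)) :
    List (String × List (String × List (String × List String))) → Option (List (List String))
  | [] => some acc
  | (_, versions) :: rest =>
    match pvLoopVersA keys acc versions with
    | none => none
    | some acc' => pvLoopPkgsA keys acc' rest

def get_all_deps (graph : List (String × List (String × List (String × List String)))) : List (List String) :=
  (pvLoopPkgsA (graph.map Prod.fst) [] graph).getD []

-- ===== PORT B =====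
-- pass 1: validation only
def pvValid (keys : List String) (graph : List (String × List (String × List (String × List String)))) : Bool :=
  graph.all (fun pv => pv.2.all (fun vd => vd.2.all (fun dp => keys.contains dp.1)))

def get_all_deps_alt (graph : List (String × List (String × List (String × List String)))) : List (List String) :=
  if pvValid (graph.map Prod.fst) graph then
    -- pass 2: flat nested comprehension
    graph.flatMap (fun pv => pv.2.flatMap (fun vd => vd.2.map Prod.snd))
  else []  -- raise ValueError (unreachable under Pre_)

-- ===== PRECONDITION & SPEC =====
-- Pre_ excludes exactly the inputs on which A (and B) raise ValueError: some dep
-- name is not a key of graph.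
def Pre_get_all_deps (graph : List (String × List (String × List (String × List String)))) : Prop :=
  ∀ pv ∈ graph, ∀ vd ∈ pv.2, ∀ dp ∈ vd.2, (graph.map Prod.fst).contains dp.1 = true
instance (graph : List (String × List (String × List (String × List String)))) : Decidable (Pre_get_all_deps graph) := by unfold Pre_get_all_deps; infer_instance

def pvWitness_get_all_deps : (List (String × List (String × List (String × List String)))) :=
  [("a", [("1.0", [("a", ["1.0", "2.0"]), ("b", ["3.0"])])]), ("b", [("2.0", [("a", ["1.0"])])])]

def Spec_get_all_deps (graph : List (String × List (String × List (String × List String)))) (out : List (List String)) : Prop := out = get_all_deps_alt graph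
instance (graph : List (String × List (String × List (String × List String)))) (out : List (List String)) : Decidable (Spec_get_all_deps graph out) := by unfold Spec_get_all_deps; infer_instance

-- ===== CLAIM (what is proved, stated in full; the proofs are below) =====
def Claim_equal_get_all_deps : Prop := ∀ (graph : List (String × List (String × List (String × List String)))), Dom_get_all_deps graph → Pre_get_all_deps graph → Spec_get_all_deps graph (get_all_deps graph)

-- ===== LEMMAS AND PROOFS =====
theorem pvLoopDepsA_eq (keys : List String) (acc : List (List String))
    (deps : List (String × List String))
    (h : ∀ dp ∈ deps, keys.contains dp.1 = true) :
    pvLoopDepsA keys acc deps = some (acc ++ deps.map Prod.snd) := by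
  induction deps generalizing acc with
  | nil => simp [pvLoopDepsA]
  | cons dp rest ih =>
    have h1 : dp.1 ∈ keys := by simpa using h dp (by simp)
    simp [pvLoopDepsA, h1, ih (acc ++ [dp.2]) (fun x hx => h x (by simp [hx]))]

theorem pvLoopVersA_eq (keys : List String) (acc : List (List String))
    (versions : List (String × List (String × List String)))
    (h : ∀ vd ∈ versions, ∀ dp ∈ vd.2, keys.contains dp.1 = true) :
    pvLoopVersA keys acc versions =
      some (acc ++ versions.flatMap (fun vd => vd.2.map Prod.snd)) := by
  induction versions generalizing acc with
  | nil => simp [pvLoopVersA]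
  | cons vd rest ih =>
    simp [pvLoopVersA, pvLoopDepsA_eq keys acc vd.2 (h vd (by simp)),
      ih (acc ++ vd.2.map Prod.snd) (fun x hx => h x (by simp [hx]))]

theorem pvLoopPkgsA_eq (keys : List String) (acc : List (List String))
    (graph : List (String × List (String × List (String × List String))))
    (h : ∀ pv ∈ graph, ∀ vd ∈ pv.2, ∀ dp ∈ vd.2, keys.contains dp.1 = true) :
    pvLoopPkgsA keys acc graph =
      some (acc ++ graph.flatMap (fun pv => pv.2.flatMap (fun vd => vd.2.map Prod.snd))) := by
  induction graph generalizing acc with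
  | nil => simp [pvLoopPkgsA]
  | cons pv rest ih =>
    simp [pvLoopPkgsA, pvLoopVersA_eq keys acc pv.2 (h pv (by simp)),
      ih _ (fun x hx => h x (by simp [hx]))]

theorem pvValid_of_pre (graph : List (String × List (String × List (String × List String))))
    (h : Pre_get_all_deps graph) : pvValid (graph.map Prod.fst) graph = true := by
  unfold pvValid
  simp only [List.all_eq_true]
  exact fun pv hpv vd hvd dp hdp => h pv hpv vd hvd dp hdp

-- ===== VERDICT (by name: the statement is the Claim_ definition above) =====
theorem get_all_deps_spec : Claim_equal_get_all_deps := by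
  intro graph _ hpre
  unfold Spec_get_all_deps get_all_deps get_all_deps_alt
  rw [pvLoopPkgsA_eq _ _ _ hpre, pvValid_of_pre _ hpre]
  simp
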